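-- pv_equiv track=rewrite | github.com/Tomatio13/deepbot | src/deepbot/security/service.py | _parse_rules_yaml
-- ===== SOURCE A (Python) =====
-- def _parse_rules_yaml(text: str) -> list[dict[str, str]]:
--     rules: list[dict[str, str]] = []
--     current: dict[str, str] | None = None
--     for raw_line in text.splitlines():
--         line = raw_line.rstrip()
--         stripped = line.strip()
--         if not stripped or stripped.startswith("#") or stripped == "rules:":
--             continue
--         if stripped.startswith("- "):
--             if current:
--                 rules.append(current)
--             current = {}
--             stripped = stripped[2:].strip()
--             if stripped and ":" in stripped:
--                 key, value = stripped.split(":", 1)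
--                 current[key.strip()] = value.strip()
--             continue
--         if current is None or ":" not in stripped:
--             continue
--         key, value = stripped.split(":", 1)
--         current[key.strip()] = value.strip()
--     if current:
--         rules.append(current)
--     return rules
-- ===== SOURCE B (Python) =====
-- def _parse_rules_yaml(text: str) -> list[dict[str, str]]:
--     # Pass 1: group the meaningful lines into blocks, one block per "- " item.
--     blocks: list[list[str]] = []
--     for raw_line in text.splitlines():
--         s = raw_line.strip()
--         if not s or s.startswith("#") or s == "rules:":
--             continue
--         if s.startswith("- "):
--             blocks.append([s[2:].strip()])
--         elif blocks:
--             blocks[-1].append(s)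
--     # Pass 2: turn each block into a dict of its "key: value" lines; drop empty ones.
--     out: list[dict[str, str]] = []
--     for block in blocks:
--         d: dict[str, str] = {}
--         for s in block:
--             if ":" in s:
--                 key, value = s.split(":", 1)
--                 d[key.strip()] = value.strip()
--         if d:
--             out.append(d)
--     return out
-- ===== Notes on version B (the rewrite author's own statement) =====
-- stated objective: alternative
-- what changed: Replaces A's single interleaved loop with a rules/current accumulator by a two-pass decomposition: first group lines into per-item blocks, then convert each block to a dict and drop empty ones.
import Mathlib
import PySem

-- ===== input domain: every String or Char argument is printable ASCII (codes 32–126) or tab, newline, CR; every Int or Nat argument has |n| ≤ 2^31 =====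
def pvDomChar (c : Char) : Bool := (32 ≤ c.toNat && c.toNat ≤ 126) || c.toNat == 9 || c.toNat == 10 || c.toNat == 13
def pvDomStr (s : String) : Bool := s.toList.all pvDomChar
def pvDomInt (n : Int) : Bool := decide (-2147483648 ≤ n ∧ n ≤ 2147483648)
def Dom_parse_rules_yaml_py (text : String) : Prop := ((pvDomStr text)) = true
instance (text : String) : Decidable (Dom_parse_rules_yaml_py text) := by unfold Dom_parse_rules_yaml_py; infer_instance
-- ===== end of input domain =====

-- B replaces A's interleaved rules/current accumulator loop by a two-pass decomposition
-- (group lines into blocks, then convert each block to a dict); same complexity, alternative structure.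

-- shared helper: the Python fragment `key, value = s.split(":", 1)` + strip of both parts,
-- which appears verbatim in both A and B
def pvSplitKV (s : String) : String × String :=
  let parts := (PySem.Str.splitMax? s ":" 1).getD []
  (PySem.Str.strip (parts.getD 0 ""), PySem.Str.strip (parts.getD 1 ""))

-- ===== PORT A =====
-- Python's `if current: rules.append(current)` (falsy = None or empty dict)
def pvA_emit (rules : List (PySem.Dict String String))
    (current : Option (PySem.Dict String String)) : List (PySem.Dict String String) :=
  match current with
  | none => rules
  | some c => if c.items.isEmpty then rules else rules ++ [c]

def pvA_loop (lines : List String) (rules : List (PySem.Dict String String))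
    (current : Option (PySem.Dict String String)) : List (PySem.Dict String String) :=
  match lines with
  | [] => pvA_emit rules current
  | raw :: rest =>
    let line := PySem.Str.rstrip raw
    let stripped := PySem.Str.strip line
    if stripped = "" ∨ PySem.Str.startswith stripped "#" = true ∨ stripped = "rules:" then
      pvA_loop rest rules current
    else if PySem.Str.startswith stripped "- " = true then
      let rules' := pvA_emit rules current
      let s2 := PySem.Str.strip (PySem.Str.slice stripped (some 2) none)
      let cur : PySem.Dict String String :=
        if ¬ s2 = "" ∧ PySem.Str.isIn ":" s2 = true then
          PySem.Dict.empty.insert (pvSplitKV s2).1 (pvSplitKV s2).2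
        else PySem.Dict.empty
      pvA_loop rest rules' (some cur)
    else
      match current with
      | none => pvA_loop rest rules none
      | some c =>
        if PySem.Str.isIn ":" stripped = true then
          pvA_loop rest rules (some (c.insert (pvSplitKV stripped).1 (pvSplitKV stripped).2))
        else
          pvA_loop rest rules (some c)

def parse_rules_yaml_py (text : String) : List (List (String × String)) :=
  (pvA_loop (PySem.Str.splitlines text) [] none).map PySem.Dict.items

-- ===== PORT B =====
-- pass 1 step: group meaningful lines into blocks, appending to the last block
def pvB_group (blocks : List (List String)) (raw : String) : List (List String) :=
  let s := PySem.Str.strip raw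
  if s = "" ∨ PySem.Str.startswith s "#" = true ∨ s = "rules:" then blocks
  else if PySem.Str.startswith s "- " = true then
    blocks ++ [[PySem.Str.strip (PySem.Str.slice s (some 2) none)]]
  else
    match blocks.getLast? with
    | none => blocks
    | some last => blocks.dropLast ++ [last ++ [s]]

-- pass 2: a block's dict, from its "key: value" lines
def pvB_dict (block : List String) : PySem.Dict String String :=
  block.foldl
    (fun d s =>
      if PySem.Str.isIn ":" s = true then d.insert (pvSplitKV s).1 (pvSplitKV s).2 else d)
    PySem.Dict.empty

def parse_rules_yaml_py_alt (text : String) : List (List (String × String)) :=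
  ((((PySem.Str.splitlines text).foldl pvB_group []).foldl
      (fun out b =>
        let d := pvB_dict b
        if d.items.isEmpty then out else out ++ [d]) [])).map PySem.Dict.items

-- ===== PRECONDITION & SPEC =====
def Spec_parse_rules_yaml_py (text : String) (out : List (List (String × String))) : Prop := out = parse_rules_yaml_py_alt text
instance (text : String) (out : List (List (String × String))) : Decidable (Spec_parse_rules_yaml_py text out) := by unfold Spec_parse_rules_yaml_py; infer_instance

-- ===== CLAIM (what is proved, stated in full; the proofs are below) =====
def Claim_equal_parse_rules_yaml_py : Prop := ∀ (text : String), Dom_parse_rules_yaml_py text → Spec_parse_rules_yaml_py text (parse_rules_yaml_py text)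

-- ===== LEMMAS AND PROOFS =====

-- strip (rstrip s) = strip s
lemma pv_dropWhile_idem (p : Char → Bool) (l : List Char) :
    List.dropWhile p (List.dropWhile p l) = List.dropWhile p l := by
  induction l with
  | nil => simp
  | cons c t ih => by_cases h : p c <;> simp [h, ih]

lemma pv_rstrip_cons (c : Char) (t : List Char) :
    PySem.Chars.rstrip (c :: t) =
      if PySem.Chars.rstrip t = [] then (if PySem.Chars.isspace c then [] else [c])
      else c :: PySem.Chars.rstrip t := by
  by_cases h : List.dropWhile PySem.Chars.isspace t.reverse = [] <;>
    by_cases hc : PySem.Chars.isspace c <;>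
      simp [PySem.Chars.rstrip, List.dropWhile_append, h, hc]

lemma pv_rstrip_eq_nil_iff (t : List Char) :
    PySem.Chars.rstrip t = [] ↔ ∀ x ∈ t, PySem.Chars.isspace x = true := by
  simp [PySem.Chars.rstrip, List.dropWhile_eq_nil_iff]

lemma pv_lstrip_rstrip_comm (s : List Char) :
    PySem.Chars.lstrip (PySem.Chars.rstrip s) = PySem.Chars.rstrip (PySem.Chars.lstrip s) := by
  induction s with
  | nil => rfl
  | cons c t ih =>
    rw [pv_rstrip_cons]
    by_cases hc : PySem.Chars.isspace c
    · by_cases h : PySem.Chars.rstrip t = []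
      · have hall := (pv_rstrip_eq_nil_iff t).mp h
        have hl : PySem.Chars.lstrip (c :: t) = [] := by
          rw [PySem.Chars.lstrip, List.dropWhile_eq_nil_iff]
          intro x hx
          rcases List.mem_cons.mp hx with rfl | hx
          · exact hc
          · exact hall x hx
        rw [if_pos h, if_pos hc, hl]
        rfl
      · simpa [h, hc, PySem.Chars.lstrip, List.dropWhile_cons] using ih
    · by_cases h : PySem.Chars.rstrip t = [] <;>
        simp [h, hc, PySem.Chars.lstrip, pv_rstrip_cons]

lemma pv_rstrip_idem (s : List Char) :
    PySem.Chars.rstrip (PySem.Chars.rstrip s) = PySem.Chars.rstrip s := by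
  simp [PySem.Chars.rstrip, List.reverse_reverse, pv_dropWhile_idem]

lemma pv_chars_strip_rstrip (s : List Char) :
    PySem.Chars.strip (PySem.Chars.rstrip s) = PySem.Chars.strip s := by
  simp [PySem.Chars.strip, pv_lstrip_rstrip_comm, pv_rstrip_idem]

lemma pv_strip_rstrip (s : String) :
    PySem.Str.strip (PySem.Str.rstrip s) = PySem.Str.strip s := by
  simp [PySem.Str.strip, PySem.Str.rstrip, pv_chars_strip_rstrip]

-- ":" in a string forces it nonempty
lemma pv_isIn_ne_empty (s : String) (h : PySem.Str.isIn ":" s = true) : ¬ s = "" := by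
  intro he
  subst he
  exact absurd h (by decide)

-- B-side proof scaffolding: B's remaining result given the current open block / no block yet
def pvBfrom (lines : List String) (blk : List String) : List (PySem.Dict String String) :=
  match lines with
  | [] => if (pvB_dict blk).items.isEmpty then [] else [pvB_dict blk]
  | raw :: rest =>
    let s := PySem.Str.strip raw
    if s = "" ∨ PySem.Str.startswith s "#" = true ∨ s = "rules:" then pvBfrom rest blk
    else if PySem.Str.startswith s "- " = true then
      (if (pvB_dict blk).items.isEmpty then [] else [pvB_dict blk]) ++
        pvBfrom rest [PySem.Str.strip (PySem.Str.slice s (some 2) none)]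
    else pvBfrom rest (blk ++ [s])

def pvBnone (lines : List String) : List (PySem.Dict String String) :=
  match lines with
  | [] => []
  | raw :: rest =>
    let s := PySem.Str.strip raw
    if s = "" ∨ PySem.Str.startswith s "#" = true ∨ s = "rules:" then pvBnone rest
    else if PySem.Str.startswith s "- " = true then
      pvBfrom rest [PySem.Str.strip (PySem.Str.slice s (some 2) none)]
    else pvBnone rest

def pvStep2 (out : List (PySem.Dict String String)) (b : List String) :
    List (PySem.Dict String String) :=
  if (pvB_dict b).items.isEmpty then out else out ++ [pvB_dict b]

def pvPass2 (blocks : List (List String)) : List (PySem.Dict String String) :=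
  blocks.foldl pvStep2 []

lemma pv_pass2_acc (blocks : List (List String)) (acc : List (PySem.Dict String String)) :
    blocks.foldl pvStep2 acc = acc ++ pvPass2 blocks := by
  induction blocks generalizing acc with
  | nil => simp [pvPass2]
  | cons b bs ih =>
    show List.foldl pvStep2 (pvStep2 acc b) bs = acc ++ pvPass2 (b :: bs)
    rw [ih]
    show _ = acc ++ List.foldl pvStep2 (pvStep2 [] b) bs
    rw [ih (pvStep2 [] b)]
    unfold pvStep2
    split <;> simp

lemma pv_pass2_append (xs ys : List (List String)) :
    pvPass2 (xs ++ ys) = pvPass2 xs ++ pvPass2 ys := by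
  unfold pvPass2
  rw [List.foldl_append, pv_pass2_acc]
  rfl

lemma pv_pass2_single (blk : List String) :
    pvPass2 [blk] = if (pvB_dict blk).items.isEmpty then [] else [pvB_dict blk] := by
  show pvStep2 [] blk = _
  unfold pvStep2
  split <;> rfl

lemma pv_dict_snoc (blk : List String) (s : String) :
    pvB_dict (blk ++ [s]) =
      if PySem.Str.isIn ":" s = true then (pvB_dict blk).insert (pvSplitKV s).1 (pvSplitKV s).2
      else pvB_dict blk := by
  show List.foldl _ PySem.Dict.empty (blk ++ [s]) = _
  rw [List.foldl_append]
  rfl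

-- A's first-entry dict equals B's one-line block dict
lemma pv_first_dict (s2 : String) :
    (if ¬ s2 = "" ∧ PySem.Str.isIn ":" s2 = true then
        (PySem.Dict.empty : PySem.Dict String String).insert (pvSplitKV s2).1 (pvSplitKV s2).2
      else PySem.Dict.empty) = pvB_dict [s2] := by
  show _ = if PySem.Str.isIn ":" s2 = true then
      (PySem.Dict.empty : PySem.Dict String String).insert (pvSplitKV s2).1 (pvSplitKV s2).2
    else PySem.Dict.empty
  by_cases h : PySem.Str.isIn ":" s2 = true
  · rw [if_pos h, if_pos ⟨pv_isIn_ne_empty s2 h, h⟩]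
  · rw [if_neg h, if_neg (fun hh => h hh.2)]

-- one-step unfoldings of B's grouping and of the scaffolding functions
lemma pvB_group_skip (blocks : List (List String)) (raw : String)
    (h1 : PySem.Str.strip raw = "" ∨ PySem.Str.startswith (PySem.Str.strip raw) "#" = true ∨ PySem.Str.strip raw = "rules:") :
    pvB_group blocks raw = blocks := by
  simp only [pvB_group]
  rw [if_pos h1]

lemma pvB_group_dash (blocks : List (List String)) (raw : String)
    (h1 : ¬ (PySem.Str.strip raw = "" ∨ PySem.Str.startswith (PySem.Str.strip raw) "#" = true ∨ PySem.Str.strip raw = "rules:"))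
    (h2 : PySem.Str.startswith (PySem.Str.strip raw) "- " = true) :
    pvB_group blocks raw = blocks ++ [[PySem.Str.strip (PySem.Str.slice (PySem.Str.strip raw) (some 2) none)]] := by
  simp only [pvB_group]
  rw [if_neg h1, if_pos h2]

lemma pvB_group_cont (done : List (List String)) (blk : List String) (raw : String)
    (h1 : ¬ (PySem.Str.strip raw = "" ∨ PySem.Str.startswith (PySem.Str.strip raw) "#" = true ∨ PySem.Str.strip raw = "rules:"))
    (h2 : ¬ PySem.Str.startswith (PySem.Str.strip raw) "- " = true) :
    pvB_group (done ++ [blk]) raw = done ++ [blk ++ [PySem.Str.strip raw]] := by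
  simp only [pvB_group]
  rw [if_neg h1, if_neg h2, List.getLast?_concat]
  simp

lemma pvB_group_cont_nil (raw : String)
    (h1 : ¬ (PySem.Str.strip raw = "" ∨ PySem.Str.startswith (PySem.Str.strip raw) "#" = true ∨ PySem.Str.strip raw = "rules:"))
    (h2 : ¬ PySem.Str.startswith (PySem.Str.strip raw) "- " = true) :
    pvB_group [] raw = [] := by
  simp only [pvB_group]
  rw [if_neg h1, if_neg h2]
  rfl

lemma pvBfrom_skip (rest : List String) (blk : List String) (raw : String)
    (h1 : PySem.Str.strip raw = "" ∨ PySem.Str.startswith (PySem.Str.strip raw) "#" = true ∨ PySem.Str.strip raw = "rules:") :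
    pvBfrom (raw :: rest) blk = pvBfrom rest blk := by
  simp only [pvBfrom]
  rw [if_pos h1]

lemma pvBfrom_dash (rest : List String) (blk : List String) (raw : String)
    (h1 : ¬ (PySem.Str.strip raw = "" ∨ PySem.Str.startswith (PySem.Str.strip raw) "#" = true ∨ PySem.Str.strip raw = "rules:"))
    (h2 : PySem.Str.startswith (PySem.Str.strip raw) "- " = true) :
    pvBfrom (raw :: rest) blk
      = (if (pvB_dict blk).items.isEmpty then [] else [pvB_dict blk]) ++
        pvBfrom rest [PySem.Str.strip (PySem.Str.slice (PySem.Str.strip raw) (some 2) none)] := by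
  simp only [pvBfrom]
  rw [if_neg h1, if_pos h2]

lemma pvBfrom_cont (rest : List String) (blk : List String) (raw : String)
    (h1 : ¬ (PySem.Str.strip raw = "" ∨ PySem.Str.startswith (PySem.Str.strip raw) "#" = true ∨ PySem.Str.strip raw = "rules:"))
    (h2 : ¬ PySem.Str.startswith (PySem.Str.strip raw) "- " = true) :
    pvBfrom (raw :: rest) blk = pvBfrom rest (blk ++ [PySem.Str.strip raw]) := by
  simp only [pvBfrom]
  rw [if_neg h1, if_neg h2]

lemma pvBnone_skip (rest : List String) (raw : String)
    (h1 : PySem.Str.strip raw = "" ∨ PySem.Str.startswith (PySem.Str.strip raw) "#" = true ∨ PySem.Str.strip raw = "rules:") :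
    pvBnone (raw :: rest) = pvBnone rest := by
  simp only [pvBnone]
  rw [if_pos h1]

lemma pvBnone_dash (rest : List String) (raw : String)
    (h1 : ¬ (PySem.Str.strip raw = "" ∨ PySem.Str.startswith (PySem.Str.strip raw) "#" = true ∨ PySem.Str.strip raw = "rules:"))
    (h2 : PySem.Str.startswith (PySem.Str.strip raw) "- " = true) :
    pvBnone (raw :: rest) = pvBfrom rest [PySem.Str.strip (PySem.Str.slice (PySem.Str.strip raw) (some 2) none)] := by
  simp only [pvBnone]
  rw [if_neg h1, if_pos h2]

lemma pvBnone_cont (rest : List String) (raw : String)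
    (h1 : ¬ (PySem.Str.strip raw = "" ∨ PySem.Str.startswith (PySem.Str.strip raw) "#" = true ∨ PySem.Str.strip raw = "rules:"))
    (h2 : ¬ PySem.Str.startswith (PySem.Str.strip raw) "- " = true) :
    pvBnone (raw :: rest) = pvBnone rest := by
  simp only [pvBnone]
  rw [if_neg h1, if_neg h2]

-- phase 1 from a nonempty block list, followed by phase 2
lemma pv_L1 (lines : List String) (done : List (List String)) (blk : List String) :
    pvPass2 (lines.foldl pvB_group (done ++ [blk])) = pvPass2 done ++ pvBfrom lines blk := by
  induction lines generalizing done blk with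
  | nil =>
    rw [List.foldl_nil, pv_pass2_append, pv_pass2_single]
    rfl
  | cons raw rest ih =>
    rw [List.foldl_cons]
    by_cases h1 : PySem.Str.strip raw = "" ∨ PySem.Str.startswith (PySem.Str.strip raw) "#" = true ∨ PySem.Str.strip raw = "rules:"
    · rw [pvB_group_skip _ _ h1, ih, pvBfrom_skip _ _ _ h1]
    · by_cases h2 : PySem.Str.startswith (PySem.Str.strip raw) "- " = true
      · rw [pvB_group_dash _ _ h1 h2, ih, pv_pass2_append, pv_pass2_single,
          pvBfrom_dash _ _ _ h1 h2, List.append_assoc]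
      · rw [pvB_group_cont _ _ _ h1 h2, ih, pvBfrom_cont _ _ _ h1 h2]

lemma pv_L2 (lines : List String) :
    pvPass2 (lines.foldl pvB_group []) = pvBnone lines := by
  induction lines with
  | nil => rfl
  | cons raw rest ih =>
    rw [List.foldl_cons]
    by_cases h1 : PySem.Str.strip raw = "" ∨ PySem.Str.startswith (PySem.Str.strip raw) "#" = true ∨ PySem.Str.strip raw = "rules:"
    · rw [pvB_group_skip _ _ h1, ih, pvBnone_skip _ _ h1]
    · by_cases h2 : PySem.Str.startswith (PySem.Str.strip raw) "- " = true
      · rw [pvB_group_dash _ _ h1 h2, pvBnone_dash _ _ h1 h2,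
          show ([] : List (List String)) ++ [[PySem.Str.strip (PySem.Str.slice (PySem.Str.strip raw) (some 2) none)]]
            = [] ++ [[PySem.Str.strip (PySem.Str.slice (PySem.Str.strip raw) (some 2) none)]] from rfl,
          pv_L1]
        rfl
      · rw [pvB_group_cont_nil _ h1 h2, ih, pvBnone_cont _ _ h1 h2]

lemma pv_L3 (lines : List String) (rules : List (PySem.Dict String String)) (blk : List String) :
    pvA_loop lines rules (some (pvB_dict blk)) = rules ++ pvBfrom lines blk := by
  induction lines generalizing rules blk with
  | nil =>
    show (if (pvB_dict blk).items.isEmpty then rules else rules ++ [pvB_dict blk])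
      = rules ++ (if (pvB_dict blk).items.isEmpty then [] else [pvB_dict blk])
    split <;> simp
  | cons raw rest ih =>
    show (let line := PySem.Str.rstrip raw
          let stripped := PySem.Str.strip line
          if stripped = "" ∨ PySem.Str.startswith stripped "#" = true ∨ stripped = "rules:" then
            pvA_loop rest rules (some (pvB_dict blk))
          else if PySem.Str.startswith stripped "- " = true then
            pvA_loop rest (pvA_emit rules (some (pvB_dict blk)))
              (some (if ¬ PySem.Str.strip (PySem.Str.slice stripped (some 2) none) = "" ∧
                        PySem.Str.isIn ":" (PySem.Str.strip (PySem.Str.slice stripped (some 2) none)) = true then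
                  PySem.Dict.empty.insert
                    (pvSplitKV (PySem.Str.strip (PySem.Str.slice stripped (some 2) none))).1
                    (pvSplitKV (PySem.Str.strip (PySem.Str.slice stripped (some 2) none))).2
                else PySem.Dict.empty))
          else if PySem.Str.isIn ":" stripped = true then
            pvA_loop rest rules
              (some ((pvB_dict blk).insert (pvSplitKV stripped).1 (pvSplitKV stripped).2))
          else pvA_loop rest rules (some (pvB_dict blk))) = _
    simp only [pv_strip_rstrip raw]
    by_cases h1 : PySem.Str.strip raw = "" ∨ PySem.Str.startswith (PySem.Str.strip raw) "#" = true ∨ PySem.Str.strip raw = "rules:"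
    · rw [if_pos h1, ih, pvBfrom_skip _ _ _ h1]
    · by_cases h2 : PySem.Str.startswith (PySem.Str.strip raw) "- " = true
      · rw [if_neg h1, if_pos h2, pv_first_dict, ih, pvBfrom_dash _ _ _ h1 h2]
        show (if (pvB_dict blk).items.isEmpty then rules else rules ++ [pvB_dict blk]) ++ _ = _
        split <;> simp
      · rw [if_neg h1, if_neg h2, pvBfrom_cont _ _ _ h1 h2]
        by_cases h3 : PySem.Str.isIn ":" (PySem.Str.strip raw) = true
        · rw [if_pos h3,
            show (pvB_dict blk).insert (pvSplitKV (PySem.Str.strip raw)).1 (pvSplitKV (PySem.Str.strip raw)).2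
              = pvB_dict (blk ++ [PySem.Str.strip raw]) from by rw [pv_dict_snoc, if_pos h3]]
          exact ih rules (blk ++ [PySem.Str.strip raw])
        · rw [if_neg h3,
            show (pvB_dict blk) = pvB_dict (blk ++ [PySem.Str.strip raw]) from by rw [pv_dict_snoc, if_neg h3]]
          exact ih rules (blk ++ [PySem.Str.strip raw])

lemma pv_L4 (lines : List String) (rules : List (PySem.Dict String String)) :
    pvA_loop lines rules none = rules ++ pvBnone lines := by
  induction lines generalizing rules with
  | nil => simp [pvA_loop, pvA_emit, pvBnone]
  | cons raw rest ih =>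
    show (let line := PySem.Str.rstrip raw
          let stripped := PySem.Str.strip line
          if stripped = "" ∨ PySem.Str.startswith stripped "#" = true ∨ stripped = "rules:" then
            pvA_loop rest rules none
          else if PySem.Str.startswith stripped "- " = true then
            pvA_loop rest (pvA_emit rules none)
              (some (if ¬ PySem.Str.strip (PySem.Str.slice stripped (some 2) none) = "" ∧
                        PySem.Str.isIn ":" (PySem.Str.strip (PySem.Str.slice stripped (some 2) none)) = true then
                  PySem.Dict.empty.insert
                    (pvSplitKV (PySem.Str.strip (PySem.Str.slice stripped (some 2) none))).1
                    (pvSplitKV (PySem.Str.strip (PySem.Str.slice stripped (some 2) none))).2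
                else PySem.Dict.empty))
          else pvA_loop rest rules none) = _
    simp only [pv_strip_rstrip raw]
    by_cases h1 : PySem.Str.strip raw = "" ∨ PySem.Str.startswith (PySem.Str.strip raw) "#" = true ∨ PySem.Str.strip raw = "rules:"
    · rw [if_pos h1, ih, pvBnone_skip _ _ h1]
    · by_cases h2 : PySem.Str.startswith (PySem.Str.strip raw) "- " = true
      · rw [if_neg h1, if_pos h2, pv_first_dict, pv_L3, pvBnone_dash _ _ h1 h2]
        rfl
      · rw [if_neg h1, if_neg h2, ih, pvBnone_cont _ _ h1 h2]

-- ===== VERDICT (by name: the statement is the Claim_ definition above) =====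
theorem parse_rules_yaml_py_spec : Claim_equal_parse_rules_yaml_py := by
  intro text _
  unfold Spec_parse_rules_yaml_py parse_rules_yaml_py parse_rules_yaml_py_alt
  rw [pv_L4]
  have h : (((PySem.Str.splitlines text).foldl pvB_group []).foldl
      (fun out b =>
        let d := pvB_dict b
        if d.items.isEmpty then out else out ++ [d]) []) =
      pvPass2 ((PySem.Str.splitlines text).foldl pvB_group []) := rfl
  rw [h, pv_L2]
  simp
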